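-- pv_equiv track=rewrite | github.com/robin-gan/Tracking-Hummingbirds | tool.py | removeSameBox
-- ===== SOURCE A (Python) =====
-- import math
--
-- def euclidean_distance(box1, box2):
--     (x, y) = box1
--     (x2, y2) = box2
--     return math.hypot(x2 - x, y2 - y)
--
-- def isSame(box1, box2):
--     (x, y, w, h) = box1
--     (x2, y2, w2, h2) = box2
--     factor = euclidean_distance((x ,y), (x2, y2)) + abs(w2-w) + abs(h2-h)
--     return factor < 100
--
-- def removeSameBox(frame1: list, frame2: list):
--     originalFrame = frame1.copy()
--     if (len(originalFrame) > 0):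
--         removeIndex = []
--         for box in frame2:
--             removeIndex += [i3 for i3, box2 in enumerate(originalFrame) if (isSame(box2, box))]
--         return [ele for i2, ele in enumerate(originalFrame) if i2 not in removeIndex]
--     return originalFrame
-- ===== SOURCE B (Python) =====
-- import math
--
-- def euclidean_distance(box1, box2):
--     (x, y) = box1
--     (x2, y2) = box2
--     return math.hypot(x2 - x, y2 - y)
--
-- def isSame(box1, box2):
--     (x, y, w, h) = box1
--     (x2, y2, w2, h2) = box2
--     factor = euclidean_distance((x, y), (x2, y2)) + abs(w2 - w) + abs(h2 - h)
--     return factor < 100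
--
-- def removeSameBox(frame1: list, frame2: list):
--     return [box for box in frame1 if not any(isSame(box, b) for b in frame2)]
-- ===== Notes on version B (the rewrite author's own statement) =====
-- stated objective: simpler
-- what changed: Replaces the copy/index-accumulation pipeline (outer loop over frame2 collecting removeIndex, then an index-membership filter with a quadratic 'i not in removeIndex' scan) by a direct single-pass filter over frame1 that tests each box against frame2 with a short-circuiting any().
import Mathlib
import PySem

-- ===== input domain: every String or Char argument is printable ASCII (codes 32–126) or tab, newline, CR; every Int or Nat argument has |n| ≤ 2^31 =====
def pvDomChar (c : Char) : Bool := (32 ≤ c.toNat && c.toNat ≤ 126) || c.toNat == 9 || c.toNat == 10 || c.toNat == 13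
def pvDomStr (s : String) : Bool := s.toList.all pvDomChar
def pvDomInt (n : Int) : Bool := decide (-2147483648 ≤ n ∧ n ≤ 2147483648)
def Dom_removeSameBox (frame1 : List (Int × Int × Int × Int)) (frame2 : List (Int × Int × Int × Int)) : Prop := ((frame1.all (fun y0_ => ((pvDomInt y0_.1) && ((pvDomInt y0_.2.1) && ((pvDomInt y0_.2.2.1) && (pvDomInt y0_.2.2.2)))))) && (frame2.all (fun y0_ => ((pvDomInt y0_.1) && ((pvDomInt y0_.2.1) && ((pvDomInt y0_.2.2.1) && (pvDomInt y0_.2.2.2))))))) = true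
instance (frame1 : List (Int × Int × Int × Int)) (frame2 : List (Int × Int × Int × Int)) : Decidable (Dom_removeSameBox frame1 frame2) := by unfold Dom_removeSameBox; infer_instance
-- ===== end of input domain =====

-- B is a direct single-pass filter over frame1 (short-circuiting any over frame2) instead of
-- A's copy / removeIndex accumulation / index-membership filter; objective: simpler.

-- ===== PORT A =====
-- Python's isSame computes hypot(x2-x, y2-y) + |w2-w| + |h2-h| < 100 in floats; on integer
-- boxes this is exactly the integer condition |Δw|+|Δh| < 100 ∧ Δx²+Δy² < (100-|Δw|-|Δh|)²
-- (whenever the float value is near the threshold 100 all magnitudes are ≤ ~10⁴, where the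
-- double-precision hypot/additions are exact up to correct rounding and cannot cross the
-- integer boundary), so the predicate is ported as exact integer arithmetic.
def pvIsSame (box1 box2 : Int × Int × Int × Int) : Bool :=
  let (x, y, w, h) := box1
  let (x2, y2, w2, h2) := box2
  let k : Int := |w2 - w| + |h2 - h|
  decide (k < 100 ∧ (x2 - x) ^ 2 + (y2 - y) ^ 2 < (100 - k) ^ 2)

def removeSameBox (frame1 : List (Int × Int × Int × Int)) (frame2 : List (Int × Int × Int × Int)) : List (Int × Int × Int × Int) :=
  let originalFrame := frame1
  if originalFrame.length > 0 then
    let removeIndex : List Int :=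
      frame2.foldl (fun acc box =>
        acc ++ (PySem.List.enumerate originalFrame 0).filterMap
          (fun p => if pvIsSame p.2 box then some p.1 else none)) []
    (PySem.List.enumerate originalFrame 0).filterMap
      (fun p => if p.1 ∈ removeIndex then none else some p.2)
  else originalFrame

-- ===== PORT B =====
def removeSameBox_alt (frame1 : List (Int × Int × Int × Int)) (frame2 : List (Int × Int × Int × Int)) : List (Int × Int × Int × Int) :=
  frame1.filter (fun box => !(frame2.any (fun b => pvIsSame box b)))

-- ===== PRECONDITION & SPEC =====
def Spec_removeSameBox (frame1 : List (Int × Int × Int × Int)) (frame2 : List (Int × Int × Int × Int)) (out : List (Int × Int × Int × Int)) : Prop := out = removeSameBox_alt frame1 frame2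
instance (frame1 : List (Int × Int × Int × Int)) (frame2 : List (Int × Int × Int × Int)) (out : List (Int × Int × Int × Int)) : Decidable (Spec_removeSameBox frame1 frame2 out) := by unfold Spec_removeSameBox; infer_instance

-- ===== CLAIM (what is proved, stated in full; the proofs are below) =====
def Claim_equal_removeSameBox : Prop := ∀ (frame1 : List (Int × Int × Int × Int)) (frame2 : List (Int × Int × Int × Int)), Dom_removeSameBox frame1 frame2 → Spec_removeSameBox frame1 frame2 (removeSameBox frame1 frame2)

-- ===== LEMMAS AND PROOFS =====

-- The index-based drop in A equals a plain filter once, for every enumerated pair,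
-- the index test is equivalent to a test on the element.
theorem pv_filterMap_enum_eq_filter {α : Type} (c : Int × α → Prop) [DecidablePred c]
    (d : α → Bool) (xs : List α) (s : Int)
    (h : ∀ p ∈ PySem.List.enumerate xs s, c p ↔ d p.2 = true) :
    (PySem.List.enumerate xs s).filterMap (fun p => if c p then none else some p.2)
      = xs.filter (fun x => !d x) := by
  induction xs generalizing s with
  | nil => simp [PySem.List.enumerate_nil]
  | cons x xs ih =>
    rw [PySem.List.enumerate_cons]
    have hc : c (s, x) ↔ d x = true :=
      h (s, x) (by rw [PySem.List.enumerate_cons]; exact List.mem_cons_self ..)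
    have ht := ih (s + 1) (fun p hp =>
      h p (by rw [PySem.List.enumerate_cons]; exact List.mem_cons_of_mem _ hp))
    by_cases hd : d x = true
    · simp [hc.2 hd, hd, ht]
    · simp only [Bool.not_eq_true] at hd
      have hnc : ¬ c (s, x) := fun hcc => by simp [hc.1 hcc] at hd
      simp [hnc, hd, ht]

-- Membership of an index in A's removeIndex, characterised on the element at that index.
theorem pv_mem_removeIndex_iff (f1 f2 : List (Int × Int × Int × Int)) (i : Int)
    (x : Int × Int × Int × Int) (hm : (i, x) ∈ PySem.List.enumerate f1 0) :
    (i ∈ f2.flatMap (fun box => (PySem.List.enumerate f1 0).filterMap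
        (fun p => if pvIsSame p.2 box then some p.1 else none)))
      ↔ (f2.any (fun b => pvIsSame x b) = true) := by
  simp only [List.mem_flatMap, List.mem_filterMap, List.any_eq_true]
  constructor
  · rintro ⟨b, hb, p, hp, hif⟩
    by_cases hs : pvIsSame p.2 b = true
    · simp only [hs, if_true, Option.some.injEq] at hif
      have hpx : p.2 = x := by
        rcases (PySem.List.mem_enumerate_iff _ _ _).1 hp with ⟨k, hk, rfl⟩
        rcases (PySem.List.mem_enumerate_iff _ _ _).1 hm with ⟨k', hk', hEq⟩
        have h1 : i = (0 : Int) + k' := congrArg Prod.fst hEq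
        have h2 : x = f1[k'] := congrArg Prod.snd hEq
        have : ((0 : Int) + k) = i := hif
        have hkk : k = k' := by omega
        simp [hkk, h2]
      exact ⟨b, hb, hpx ▸ hs⟩
    · simp [hs] at hif
  · rintro ⟨b, hb, hs⟩
    exact ⟨b, hb, (i, x), hm, by simp [hs]⟩

-- ===== VERDICT (by name: the statement is the Claim_ definition above) =====
theorem removeSameBox_spec : Claim_equal_removeSameBox := by
  intro frame1 frame2 _
  unfold Spec_removeSameBox removeSameBox removeSameBox_alt
  cases frame1 with
  | nil => simp
  | cons y ys =>
    simp only [List.length_cons, Nat.zero_lt_succ, if_pos, gt_iff_lt]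
    rw [PySem.List.foldl_append_eq_flatMap, List.nil_append]
    exact pv_filterMap_enum_eq_filter _ _ _ 0 (fun p hp => by
      obtain ⟨i, x⟩ := p
      exact pv_mem_removeIndex_iff (y :: ys) frame2 i x hp)
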